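-- pv_equiv track=rewrite | github.com/Temistat/Python | hw7_q5.py | get_matryoshka_list
-- ===== SOURCE A (Python) =====
-- def get_matryoshka_list(original_list):
--     lst = []
--     lst_1 = []
--     for i in range(len(original_list)):
--         if i < len(original_list) - 1:
--            if original_list[i + 1] > original_list[i]:
--               lst.append(original_list[i])
--            else:
--               lst.append(original_list[i])
--               lst_1.append(lst)
--               lst = []
--         else:
--             lst.append(original_list[i])
--             lst_1.append(lst)
--     return lst_1
-- ===== SOURCE B (Python) =====
-- def get_matryoshka_list(original_list):
--     result = []
--     i = 0
--     n = len(original_list)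
--     while i < n:
--         j = i + 1
--         while j < n and original_list[j] > original_list[j - 1]:
--             j += 1
--         result.append(original_list[i:j])
--         i = j
--     return result
-- ===== Notes on version B (the rewrite author's own statement) =====
-- stated objective: alternative
-- what changed: B finds each increasing run's end index with an inner scan and appends a slice per run, instead of A's element-by-element append/reset of a pending sublist.
import Mathlib
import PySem

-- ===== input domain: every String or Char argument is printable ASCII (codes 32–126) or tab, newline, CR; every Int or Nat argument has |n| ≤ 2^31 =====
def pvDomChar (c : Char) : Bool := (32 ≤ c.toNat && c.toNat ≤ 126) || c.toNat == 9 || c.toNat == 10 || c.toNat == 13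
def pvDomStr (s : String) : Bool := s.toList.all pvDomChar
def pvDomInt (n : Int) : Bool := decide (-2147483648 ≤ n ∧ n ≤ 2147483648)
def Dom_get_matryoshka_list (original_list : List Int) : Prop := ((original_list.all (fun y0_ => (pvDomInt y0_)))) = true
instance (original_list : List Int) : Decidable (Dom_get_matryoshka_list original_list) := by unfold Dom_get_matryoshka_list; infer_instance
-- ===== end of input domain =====

-- B splits the list into increasing runs by scanning for each run's end index and slicing,
-- instead of A's single pass that appends each element to a pending sublist and resets it
-- at each non-increase (objective: alternative decomposition, same cost).

-- ===== PORT A =====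
-- the for-loop over range(len(original_list)) with state (lst, lst_1), as index recursion
def getmA (l : List Int) (i : Nat) (lst : List Int) (lst_1 : List (List Int)) :
    List (List Int) :=
  if h : i < l.length then
    if h2 : i + 1 < l.length then            -- Python: i < len(original_list) - 1
      if l[i + 1] > l[i] then
        getmA l (i + 1) (lst ++ [l[i]]) lst_1
      else
        getmA l (i + 1) [] (lst_1 ++ [lst ++ [l[i]]])
    else
      getmA l (i + 1) lst (lst_1 ++ [lst ++ [l[i]]])
  else lst_1
termination_by l.length - i

def get_matryoshka_list (original_list : List Int) : List (List Int) :=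
  getmA original_list 0 [] []

-- ===== PORT B =====
-- inner while loop: j += 1 while j < n and original_list[j] > original_list[j-1]
def runEnd (l : List Int) (j : Nat) : Nat :=
  if _h : j < l.length then
    if l[j] > l[j - 1]! then runEnd l (j + 1) else j
  else j
termination_by l.length - j

theorem runEnd_ge (l : List Int) (j : Nat) : j ≤ runEnd l j := by
  unfold runEnd
  split
  · split
    · have := runEnd_ge l (j + 1); omega
    · omega
  · omega
termination_by l.length - j

-- outer while loop over i with accumulator result
def getmB (l : List Int) (i : Nat) (result : List (List Int)) : List (List Int) :=
  if _h : i < l.length then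
    let j := runEnd l (i + 1)
    getmB l j (result ++ [PySem.List.slice l (some (i : Int)) (some (j : Int))])
  else result
termination_by l.length - i
decreasing_by
  have := runEnd_ge l (i + 1); omega

def get_matryoshka_list_alt (original_list : List Int) : List (List Int) :=
  getmB original_list 0 []

-- ===== PRECONDITION & SPEC =====
def Spec_get_matryoshka_list (original_list : List Int) (out : List (List Int)) : Prop := out = get_matryoshka_list_alt original_list
instance (original_list : List Int) (out : List (List Int)) : Decidable (Spec_get_matryoshka_list original_list out) := by unfold Spec_get_matryoshka_list; infer_instance

-- ===== CLAIM (what is proved, stated in full; the proofs are below) =====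
def Claim_equal_get_matryoshka_list : Prop := ∀ (original_list : List Int), Dom_get_matryoshka_list original_list → Spec_get_matryoshka_list original_list (get_matryoshka_list original_list)

-- ===== LEMMAS AND PROOFS =====

-- reference function: (takeRun p xs).1 = longest prefix of xs chain-increasing above p
def takeRun (p : Int) : List Int → List Int × List Int
  | [] => ([], [])
  | x :: xs =>
    if x > p then
      let r := takeRun x xs
      (x :: r.1, r.2)
    else ([], x :: xs)

theorem takeRun_snd (p : Int) (xs : List Int) :
    (takeRun p xs).2 = xs.drop (takeRun p xs).1.length := by
  induction xs generalizing p with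
  | nil => simp [takeRun]
  | cons x xs ih =>
    simp only [takeRun]
    split
    · simpa using ih x
    · simp

theorem takeRun_len_le (p : Int) (xs : List Int) :
    (takeRun p xs).1.length ≤ xs.length := by
  induction xs generalizing p with
  | nil => simp [takeRun]
  | cons x xs ih =>
    simp only [takeRun]
    split
    · have := ih x; simpa using Nat.succ_le_succ this
    · simp

-- reference splitter
def runs : List Int → List (List Int)
  | [] => []
  | x :: xs =>
    let r := takeRun x xs
    (x :: r.1) :: runs r.2
termination_by l => l.length
decreasing_by
  have h := takeRun_snd x xs
  have h2 := takeRun_len_le x xs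
  simp only [h, List.length_drop, List.length_cons]
  omega

theorem runs_nil : runs [] = [] := by
  unfold runs
  rfl

theorem runs_cons (x : Int) (xs : List Int) :
    runs (x :: xs) = (x :: (takeRun x xs).1) :: runs (takeRun x xs).2 := by
  conv_lhs => unfold runs

theorem takeRun_take (p : Int) (xs : List Int) :
    xs.take (takeRun p xs).1.length = (takeRun p xs).1 := by
  induction xs generalizing p with
  | nil => simp [takeRun]
  | cons x xs ih =>
    simp only [takeRun]
    split
    · simpa using ih x
    · simp

-- A's pending-run consumer
def consume (lst : List Int) : List Int → List (List Int)
  | [] => []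
  | [a] => [lst ++ [a]]
  | a :: b :: rest =>
    if b > a then consume (lst ++ [a]) (b :: rest)
    else (lst ++ [a]) :: consume [] (b :: rest)

theorem drop_eq_getElem_cons {l : List Int} {i : Nat} (h : i < l.length) :
    l.drop i = l[i] :: l.drop (i + 1) := by
  rw [List.drop_eq_getElem_cons h]

theorem getmA_eq_consume (l : List Int) (i : Nat) (lst : List Int)
    (acc : List (List Int)) :
    getmA l i lst acc = acc ++ consume lst (l.drop i) := by
  unfold getmA
  split
  · rename_i h
    rw [drop_eq_getElem_cons h]
    split
    · rename_i h2
      rw [drop_eq_getElem_cons h2]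
      by_cases hg : l[i + 1] > l[i]
      · rw [if_pos hg, getmA_eq_consume l (i + 1) (lst ++ [l[i]]) acc,
          drop_eq_getElem_cons h2]
        simp [consume, hg]
      · rw [if_neg hg, getmA_eq_consume l (i + 1) [] (acc ++ [lst ++ [l[i]]]),
          drop_eq_getElem_cons h2]
        simp [consume, hg]
    · rename_i h2
      have hd : l.drop (i + 1) = [] := by
        apply List.drop_eq_nil_of_le; omega
      rw [getmA_eq_consume l (i + 1) lst (acc ++ [lst ++ [l[i]]]), hd]
      simp [consume]
  · rename_i h
    have hd : l.drop i = [] := by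
      apply List.drop_eq_nil_of_le; omega
    simp [hd, consume]
termination_by l.length - i

theorem consume_eq_runs (xs : List Int) (lst : List Int) (a : Int) :
    consume lst (a :: xs) =
      (lst ++ a :: (takeRun a xs).1) :: runs (takeRun a xs).2 := by
  induction xs generalizing lst a with
  | nil => simp [consume, takeRun, runs_nil]
  | cons b rest ih =>
    simp only [consume]
    by_cases hg : b > a
    · rw [if_pos hg, ih (lst ++ [a]) b]
      simp [takeRun, hg]
    · rw [if_neg hg, ih [] b]
      simp only [takeRun, if_neg hg]
      simp [runs_cons]

theorem runEnd_eq (l : List Int) (j : Nat) (hj : 0 < j) (hle : j ≤ l.length)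
    (hjl : j - 1 < l.length) :
    runEnd l j = j + (takeRun l[j - 1] (l.drop j)).1.length := by
  unfold runEnd
  split
  · rename_i h
    rw [drop_eq_getElem_cons h]
    have hb : l[j - 1]! = l[j - 1] := getElem!_pos l (j - 1) hjl
    by_cases hg : l[j] > l[j - 1]
    · rw [if_pos (by rw [hb]; exact hg)]
      rw [runEnd_eq l (j + 1) (by omega) (by omega) (by simpa using h)]
      simp only [takeRun, if_pos hg]
      simp
      omega
    · rw [if_neg (by rw [hb]; exact hg)]
      simp only [takeRun, if_neg hg]
      simp
  · rename_i h
    have : j = l.length := by omega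
    subst this
    simp [takeRun]
termination_by l.length - j

theorem getmB_eq_runs (l : List Int) (i : Nat) (acc : List (List Int)) :
    getmB l i acc = acc ++ runs (l.drop i) := by
  unfold getmB
  split
  · rename_i h
    have hre := runEnd_eq l (i + 1) (by omega) (by omega) (by simpa using h)
    simp only [Nat.add_sub_cancel] at hre
    have hslice : PySem.List.slice l (some (i : Int)) (some ((runEnd l (i + 1) : Nat) : Int))
        = l[i] :: (takeRun l[i] (l.drop (i + 1))).1 := by
      rw [PySem.List.slice_natCast, hre, drop_eq_getElem_cons h]
      have heq : i + 1 + (takeRun l[i] (l.drop (i + 1))).1.length - i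
          = (takeRun l[i] (l.drop (i + 1))).1.length + 1 := by omega
      rw [heq, List.take_succ_cons, takeRun_take]
    have hdrop : l.drop (runEnd l (i + 1)) = (takeRun l[i] (l.drop (i + 1))).2 := by
      rw [hre, ← List.drop_drop, ← takeRun_snd]
    rw [getmB_eq_runs l (runEnd l (i + 1)) _, hslice, hdrop,
      drop_eq_getElem_cons h, runs_cons]
    simp
  · rename_i h
    have hd : l.drop i = [] := by
      apply List.drop_eq_nil_of_le; omega
    simp [hd, runs_nil]
termination_by l.length - i
decreasing_by
  have := runEnd_ge l (i + 1); omega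

-- ===== VERDICT (by name: the statement is the Claim_ definition above) =====
theorem get_matryoshka_list_spec : Claim_equal_get_matryoshka_list := by
  intro l _
  unfold Spec_get_matryoshka_list get_matryoshka_list get_matryoshka_list_alt
  rw [getmA_eq_consume, getmB_eq_runs]
  cases l with
  | nil => simp [consume, runs_nil]
  | cons a xs =>
    simp only [List.drop_zero]
    rw [consume_eq_runs, runs_cons]
    simp
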